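-- pv_equiv track=rewrite | github.com/Brunohdp/Carreira-Especialista-em-IA | python_inteligencia_artificial_aplicada/desafio-final.py | processar_avaliacoes
-- ===== SOURCE A (Python) =====
-- def processar_avaliacoes(lista_dicionarios):
--     contador_positivas = 0
--     contador_negativas = 0
--     contador_neutras = 0
--     lista_dicionarios_str = []
--
--     for dicionario in lista_dicionarios:
--         if dicionario['avaliacao'] == "Positiva":
--             contador_positivas += 1
--         elif dicionario['avaliacao'] == "Negativa":
--             contador_negativas += 1
--         else:
--             contador_neutras += 1
--
--         lista_dicionarios_str.append(str(dicionario))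
--
--     texto_final_unido = "#####".join(lista_dicionarios_str)
--
--     return {"Positiva": contador_positivas, "Negativa": contador_negativas, "Neutra": contador_neutras}, texto_final_unido
-- ===== SOURCE B (Python) =====
-- def processar_avaliacoes(lista_dicionarios):
--     texto_final_unido = "#####".join(str(d) for d in lista_dicionarios)
--     pos = sum(1 for d in lista_dicionarios if d['avaliacao'] == "Positiva")
--     neg = sum(1 for d in lista_dicionarios if d['avaliacao'] == "Negativa")
--     neutra = len(lista_dicionarios) - pos - neg
--     return {"Positiva": pos, "Negativa": neg, "Neutra": neutra}, texto_final_unido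
-- ===== Notes on version B (the rewrite author's own statement) =====
-- stated objective: alternative
-- what changed: B joins the dict-strings first with a single join over a map, then counts 'Positiva' and 'Negativa' in two independent passes and derives the neutral count by subtraction (len - pos - neg), replacing A's one interleaved loop with three counters and an explicit else-branch.
-- outside the precondition, e.g. on processar_avaliacoes([{}]): A raises KeyError, B raises KeyError
import Mathlib
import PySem

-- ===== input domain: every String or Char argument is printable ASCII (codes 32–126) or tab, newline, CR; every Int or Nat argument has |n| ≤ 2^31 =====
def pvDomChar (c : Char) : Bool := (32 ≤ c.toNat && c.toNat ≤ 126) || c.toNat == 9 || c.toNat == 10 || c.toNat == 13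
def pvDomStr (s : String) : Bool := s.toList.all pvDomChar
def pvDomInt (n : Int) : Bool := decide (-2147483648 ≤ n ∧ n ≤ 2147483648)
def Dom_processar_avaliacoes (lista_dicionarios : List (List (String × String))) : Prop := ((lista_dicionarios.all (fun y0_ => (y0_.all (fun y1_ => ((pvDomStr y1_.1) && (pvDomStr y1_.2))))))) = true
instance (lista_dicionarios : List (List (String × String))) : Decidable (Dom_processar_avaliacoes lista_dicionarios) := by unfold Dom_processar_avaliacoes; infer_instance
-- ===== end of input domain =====

-- B changes the decomposition: it joins the dict-strings first, then counts "Positiva" and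
-- "Negativa" in two independent passes and derives the neutral count by subtraction
-- (len - pos - neg) instead of A's single interleaved loop with an explicit else-counter.
-- Objective: alternative decomposition (no speed claim).

-- ===== PORT A =====
-- shared helper: Python's repr of a printable-ASCII str char under quote q (hand port; exact on Dom)
def pyReprChar (q : Char) (c : Char) : List Char :=
  if c = '\\' then ['\\', '\\']
  else if c = q then ['\\', q]
  else if c = '\t' then ['\\', 't']
  else if c = '\n' then ['\\', 'n']
  else if c = '\r' then ['\\', 'r']
  else [c]

-- Python repr(s) for printable-ASCII strings: single quotes unless s has ' and no " (hand port; exact on Dom)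
def pyReprStr (s : String) : String :=
  let cs := s.toList
  let q : Char := if cs.contains '\'' ∧ ¬ cs.contains '"' then '"' else '\''
  String.ofList (q :: cs.flatMap (pyReprChar q) ++ [q])

-- Python str(d) for a str→str dict (hand port; exact on Dom)
def pyReprDict (d : List (String × String)) : String :=
  PySem.Str.join "" ["{", PySem.Str.join ", " (d.map (fun kv => PySem.Str.join "" [pyReprStr kv.1, ": ", pyReprStr kv.2])), "}"]

-- d['avaliacao'] (first match); default "" is never reached inside Pre_ (KeyError excluded there)
def lookupD (d : List (String × String)) (k : String) : String :=
  match d with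
  | [] => ""
  | (k', v) :: rest => if k' = k then v else lookupD rest k

def processar_avaliacoes (lista_dicionarios : List (List (String × String))) : (List (String × Int)) × String :=
  let st := lista_dicionarios.foldl
    (fun (st : Int × Int × Int × List String) d =>
      let (p, n, nt, strs) := st
      let a := lookupD d "avaliacao"
      let (p, n, nt) :=
        if a = "Positiva" then (p + 1, n, nt)
        else if a = "Negativa" then (p, n + 1, nt)
        else (p, n, nt + 1)
      (p, n, nt, strs ++ [pyReprDict d]))
    (0, 0, 0, [])
  ([("Positiva", st.1), ("Negativa", st.2.1), ("Neutra", st.2.2.1)], PySem.Str.join "#####" st.2.2.2)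

-- ===== PORT B =====
def processar_avaliacoes_alt (lista_dicionarios : List (List (String × String))) : (List (String × Int)) × String :=
  let texto_final_unido := PySem.Str.join "#####" (lista_dicionarios.map pyReprDict)
  let pos : Int := lista_dicionarios.countP (fun d => lookupD d "avaliacao" == "Positiva")
  let neg : Int := lista_dicionarios.countP (fun d => lookupD d "avaliacao" == "Negativa")
  let neutra : Int := (lista_dicionarios.length : Int) - pos - neg
  ([("Positiva", pos), ("Negativa", neg), ("Neutra", neutra)], texto_final_unido)

-- ===== PRECONDITION & SPEC =====
-- Pre_ excludes exactly the inputs where some dict lacks the key 'avaliacao' (Python A raises KeyError there)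
def Pre_processar_avaliacoes (lista_dicionarios : List (List (String × String))) : Prop :=
  (lista_dicionarios.all (fun d => d.any (fun kv => kv.1 == "avaliacao"))) = true
instance (lista_dicionarios : List (List (String × String))) : Decidable (Pre_processar_avaliacoes lista_dicionarios) := by unfold Pre_processar_avaliacoes; infer_instance

def pvWitness_processar_avaliacoes : (List (List (String × String))) := [[("avaliacao", "Positiva")], [("avaliacao", "ok")]]

def Spec_processar_avaliacoes (lista_dicionarios : List (List (String × String))) (out : (List (String × Int)) × String) : Prop := out = processar_avaliacoes_alt lista_dicionarios
instance (lista_dicionarios : List (List (String × String))) (out : (List (String × Int)) × String) : Decidable (Spec_processar_avaliacoes lista_dicionarios out) := by unfold Spec_processar_avaliacoes; infer_instance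

-- ===== CLAIM (what is proved, stated in full; the proofs are below) =====
def Claim_equal_processar_avaliacoes : Prop := ∀ (lista_dicionarios : List (List (String × String))), Dom_processar_avaliacoes lista_dicionarios → Pre_processar_avaliacoes lista_dicionarios → Spec_processar_avaliacoes lista_dicionarios (processar_avaliacoes lista_dicionarios)

-- ===== LEMMAS AND PROOFS =====
-- invariant of A's single loop, stated against B's three independent counts
theorem loopA_inv (lista : List (List (String × String))) (p n nt : Int) (strs : List String) :
    lista.foldl
      (fun (st : Int × Int × Int × List String) d =>
        let (p, n, nt, strs) := st
        let a := lookupD d "avaliacao"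
        let (p, n, nt) :=
          if a = "Positiva" then (p + 1, n, nt)
          else if a = "Negativa" then (p, n + 1, nt)
          else (p, n, nt + 1)
        (p, n, nt, strs ++ [pyReprDict d]))
      (p, n, nt, strs)
    = (p + lista.countP (fun d => lookupD d "avaliacao" == "Positiva"),
       n + lista.countP (fun d => lookupD d "avaliacao" == "Negativa"),
       nt + ((lista.length : Int)
             - lista.countP (fun d => lookupD d "avaliacao" == "Positiva")
             - lista.countP (fun d => lookupD d "avaliacao" == "Negativa")),
       strs ++ lista.map pyReprDict) := by
  induction lista generalizing p n nt strs with
  | nil => simp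
  | cons d rest ih =>
    simp only [List.foldl_cons, List.countP_cons, List.map_cons, List.length_cons]
    rw [ih]
    by_cases h1 : lookupD d "avaliacao" = "Positiva"
    · simp [h1]; omega
    · by_cases h2 : lookupD d "avaliacao" = "Negativa"
      · simp [h2]; omega
      · simp [h1, h2]; omega

-- ===== VERDICT (by name: the statement is the Claim_ definition above) =====
theorem processar_avaliacoes_spec : Claim_equal_processar_avaliacoes := by
  intro lista _ _
  unfold Spec_processar_avaliacoes processar_avaliacoes processar_avaliacoes_alt
  rw [loopA_inv]
  simp
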